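-- pv_equiv track=rewrite | github.com/PascalSchwab/AdventCoding | 1.Advent/main.py | getDigitList
-- ===== SOURCE A (Python) =====
-- textToNumber = {
--     "one" : '1',
--     "two": '2',
--     "three": '3',
--     "four": '4',
--     "five": '5',
--     "six": '6',
--     "seven": '7',
--     "eight": '8',
--     "nine": '9'
-- }
--
-- def getDigitList(text):
--     numbers = {}
--     for textNumber in textToNumber:
--         list = [i for i in range(len(text)) if text.startswith(textNumber, i)]
--         for index in list:
--             numbers[index] = textToNumber[textNumber]
--     for i in range(len(text)):
--         if text[i].isdigit():
--             numbers[i] = text[i]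
--     numbers = dict(sorted(numbers.items()))
--     digits = [i for i in numbers.values()]
--     return digits
-- ===== SOURCE B (Python) =====
-- textToNumber = {
--     "one" : '1',
--     "two": '2',
--     "three": '3',
--     "four": '4',
--     "five": '5',
--     "six": '6',
--     "seven": '7',
--     "eight": '8',
--     "nine": '9'
-- }
--
-- def getDigitList(text):
--     # single left-to-right pass; at each position at most one token (digit char
--     # or spelled word) can start, so results come out already in positional order
--     digits = []
--     for i in range(len(text)):
--         ch = text[i]
--         if ch.isdigit():
--             digits.append(ch)
--         else:
--             for word, digit in textToNumber.items():
--                 if text.startswith(word, i):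
--                     digits.append(digit)
--                     break
--     return digits
-- ===== Notes on version B (the rewrite author's own statement) =====
-- stated objective: simpler
-- what changed: A collects every spelled-word and digit match into a position-keyed dict (one full scan per word plus a digit scan) and then sorts the keys; B makes one left-to-right pass that at each position appends the digit char or the first (unique) matching word's digit, so the intermediate dict and the sort disappear.
import Mathlib
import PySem

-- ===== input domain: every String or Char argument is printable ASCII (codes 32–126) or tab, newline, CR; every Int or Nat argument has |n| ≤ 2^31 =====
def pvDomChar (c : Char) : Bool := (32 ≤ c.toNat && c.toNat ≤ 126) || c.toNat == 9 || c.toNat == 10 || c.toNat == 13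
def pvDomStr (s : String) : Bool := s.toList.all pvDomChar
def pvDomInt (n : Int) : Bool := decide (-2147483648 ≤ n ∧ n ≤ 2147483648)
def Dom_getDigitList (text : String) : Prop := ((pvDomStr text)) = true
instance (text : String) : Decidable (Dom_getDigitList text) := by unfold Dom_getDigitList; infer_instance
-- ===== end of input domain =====

-- B replaces A's "collect every match into a dict keyed by position, then sort the keys"
-- with a single left-to-right pass that emits matches already in positional order (simpler).

-- the module-level dict textToNumber, as an insertion-ordered association list
def textToNumber : List (String × String) :=
  [("one", "1"), ("two", "2"), ("three", "3"), ("four", "4"), ("five", "5"),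
   ("six", "6"), ("seven", "7"), ("eight", "8"), ("nine", "9")]

-- text.startswith(w, i): w is a prefix of the suffix of text starting at i
-- (exact for the nonnegative i produced by range(len(text)))
def swAt (cs w : List Char) (i : Nat) : Bool := w.isPrefixOf (cs.drop i)

-- text[i]: both loops only read positions i < len(text), where getD is exact
def chAt (cs : List Char) (i : Nat) : Char := cs.getD i ' '

-- ===== PORT A =====
-- indices produced by range(len(text)) are nonnegative, so they are ported as Nat keys
-- for textNumber in textToNumber:
--     list = [i for i in range(len(text)) if text.startswith(textNumber, i)]
--     for index in list: numbers[index] = textToNumber[textNumber]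
def wordPass (cs : List Char) : PySem.Dict Nat String :=
  textToNumber.foldl
    (fun d p =>
      ((List.range cs.length).filter (fun i => swAt cs p.1.toList i)).foldl
        (fun d index => d.insert index p.2) d)
    PySem.Dict.empty

-- for i in range(len(text)): if text[i].isdigit(): numbers[i] = text[i]
def digitPass (cs : List Char) (d : PySem.Dict Nat String) : PySem.Dict Nat String :=
  (List.range cs.length).foldl
    (fun d i =>
      if PySem.Chars.isdigit (chAt cs i) then d.insert i (String.mk [chAt cs i]) else d)
    d

-- numbers = dict(sorted(numbers.items())): dict keys are distinct, so Python's tuple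
-- comparison is decided by the first component — sorting by the key is exact here;
-- digits = [i for i in numbers.values()]
def getDigitList (text : String) : List String :=
  (PySem.List.sorted (digitPass text.toList (wordPass text.toList)).items
      (fun p => p.1)).map (fun p => p.2)

-- ===== PORT B =====
def getDigitList_alt (text : String) : List String :=
  (List.range text.toList.length).foldl
    (fun acc i =>
      if PySem.Chars.isdigit (chAt text.toList i) then acc ++ [String.mk [chAt text.toList i]]
      else
        -- for word, digit in textToNumber.items(): if text.startswith(word, i): append; break
        match textToNumber.find? (fun p => swAt text.toList p.1.toList i) with
        | some p => acc ++ [p.2]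
        | none => acc)
    []

-- ===== PRECONDITION & SPEC =====
def Spec_getDigitList (text : String) (out : List String) : Prop := out = getDigitList_alt text
instance (text : String) (out : List String) : Decidable (Spec_getDigitList text out) := by unfold Spec_getDigitList; infer_instance

-- ===== CLAIM (what is proved, stated in full; the proofs are below) =====
def Claim_equal_getDigitList : Prop := ∀ (text : String), Dom_getDigitList text → Spec_getDigitList text (getDigitList text)

-- ===== LEMMAS AND PROOFS =====

-- the per-position result both programs agree on
def tokAt (cs : List Char) (i : Nat) : Option String :=
  if PySem.Chars.isdigit (chAt cs i) then some (String.mk [chAt cs i])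
  else (textToNumber.find? (fun p => swAt cs p.1.toList i)).map (·.2)

-- B's loop body appends exactly tokAt
lemma alt_step (cs : List Char) (acc : List String) (i : Nat) :
    (if PySem.Chars.isdigit (chAt cs i) then acc ++ [String.mk [chAt cs i]]
     else
       match textToNumber.find? (fun p => swAt cs p.1.toList i) with
       | some p => acc ++ [p.2]
       | none => acc)
      = acc ++ (tokAt cs i).toList := by
  unfold tokAt
  split
  · simp
  · cases h : textToNumber.find? (fun p => swAt cs p.1.toList i) <;> simp [h]

-- B is the filterMap of tokAt over the positions
lemma alt_eq (text : String) :
    getDigitList_alt text = (List.range text.toList.length).filterMap (tokAt text.toList) := by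
  unfold getDigitList_alt
  generalize text.toList = cs
  suffices h : ∀ (l : List Nat) (acc : List String),
      l.foldl
        (fun acc i =>
          if PySem.Chars.isdigit (chAt cs i) then acc ++ [String.mk [chAt cs i]]
          else
            match textToNumber.find? (fun p => swAt cs p.1.toList i) with
            | some p => acc ++ [p.2]
            | none => acc)
        acc = acc ++ l.filterMap (tokAt cs) by
    simpa using h (List.range cs.length) []
  intro l
  induction l with
  | nil => simp
  | cons i t ih =>
      intro acc
      rw [List.foldl_cons, alt_step, ih, List.filterMap_cons]
      cases h : tokAt cs i <;> simp [h]

-- a word match at i forces i < length (all words are nonempty)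
lemma swAt_lt {cs w : List Char} {i : Nat} (hw : w ≠ []) (h : swAt cs w i = true) :
    i < cs.length := by
  have hp : w <+: cs.drop i := by simpa [swAt, List.isPrefixOf_iff_prefix] using h
  have hl := hp.length_le
  simp only [List.length_drop] at hl
  rcases w with _ | ⟨a, t⟩
  · exact absurd rfl hw
  · simp only [List.length_cons] at hl; omega

lemma find?_none_of_ge {cs : List Char} {i : Nat} (h : cs.length ≤ i) :
    textToNumber.find? (fun p => swAt cs p.1.toList i) = none := by
  rw [List.find?_eq_none]
  intro p hp
  simp only [Bool.not_eq_true]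
  by_contra hb
  have hm : swAt cs p.1.toList i = true := by
    cases hx : swAt cs p.1.toList i
    · exact absurd hx hb
    · rfl
  have hw : p.1.toList ≠ [] := by fin_cases hp <;> simp
  exact absurd (swAt_lt hw hm) (by omega)

lemma tokAt_none_of_ge {cs : List Char} {i : Nat} (h : cs.length ≤ i) :
    tokAt cs i = none := by
  have hg : chAt cs i = ' ' := List.getD_eq_default _ _ h
  rw [tokAt, hg, find?_none_of_ge h]
  simp [show PySem.Chars.isdigit ' ' = false by decide]

-- at most one word of textToNumber starts at a given position
lemma words_excl (cs : List Char) (i : Nat) :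
    textToNumber.Pairwise
      (fun p q => ¬(swAt cs p.1.toList i = true ∧ swAt cs q.1.toList i = true)) := by
  have base : textToNumber.Pairwise
      (fun p q => ¬(p.1.toList <+: q.1.toList) ∧ ¬(q.1.toList <+: p.1.toList)) := by
    simp only [← List.isPrefixOf_iff_prefix]; decide
  refine base.imp ?_
  rintro p q ⟨h1, h2⟩ ⟨hp, hq⟩
  have hp' : p.1.toList <+: cs.drop i := by simpa [swAt, List.isPrefixOf_iff_prefix] using hp
  have hq' : q.1.toList <+: cs.drop i := by simpa [swAt, List.isPrefixOf_iff_prefix] using hq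
  rcases List.prefix_or_prefix_of_prefix hp' hq' with h | h
  · exact h1 h
  · exact h2 h

-- inserting a constant value at every index of a list
lemma get?_foldl_insert_const (idxs : List Nat) (v : String) (d : PySem.Dict Nat String) (k : Nat) :
    (idxs.foldl (fun d i => d.insert i v) d).get? k
      = if k ∈ idxs then some v else d.get? k := by
  induction idxs generalizing d with
  | nil => simp
  | cons i t ih =>
      simp only [List.foldl_cons, ih, List.mem_cons]
      by_cases hk : k ∈ t
      · simp [hk]
      · by_cases hik : k = i
        · simp [hk, hik, PySem.Dict.get?_insert_self]
        · simp [hk, hik, PySem.Dict.get?_insert_of_ne _ _ hik]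

-- a word-loop in which no word matches position k leaves the entry at k unchanged
lemma phase1_nomatch (cs : List Char) (k : Nat) (ws : List (String × String))
    (d : PySem.Dict Nat String)
    (h : ∀ p ∈ ws, ¬ swAt cs p.1.toList k = true) :
    ((ws.foldl
        (fun d p =>
          ((List.range cs.length).filter (fun i => swAt cs p.1.toList i)).foldl
            (fun d index => d.insert index p.2) d)
        d).get? k) = d.get? k := by
  induction ws generalizing d with
  | nil => rfl
  | cons p t ih =>
      simp only [List.foldl_cons]
      rw [ih _ (fun q hq => h q (List.mem_cons_of_mem _ hq))]
      rw [get?_foldl_insert_const]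
      have hm := h p (List.mem_cons_self ..)
      simp [hm]

-- the word loop at position k: the entry is the first (= only) matching word's digit
lemma phase1_get? (cs : List Char) (k : Nat) (ws : List (String × String))
    (d : PySem.Dict Nat String)
    (hex : ws.Pairwise
      (fun p q => ¬(swAt cs p.1.toList k = true ∧ swAt cs q.1.toList k = true)))
    (hlt : ∀ p ∈ ws, swAt cs p.1.toList k = true → k < cs.length) :
    ((ws.foldl
        (fun d p =>
          ((List.range cs.length).filter (fun i => swAt cs p.1.toList i)).foldl
            (fun d index => d.insert index p.2) d)
        d).get? k)
      = match ws.find? (fun p => swAt cs p.1.toList k) with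
        | some p => some p.2
        | none => d.get? k := by
  induction ws generalizing d with
  | nil => rfl
  | cons p t ih =>
      simp only [List.foldl_cons]
      rcases List.pairwise_cons.mp hex with ⟨hhd, htl⟩
      by_cases hm : swAt cs p.1.toList k = true
      · rw [phase1_nomatch cs k t _ (fun q hq hs => hhd q hq ⟨hm, hs⟩)]
        rw [get?_foldl_insert_const,
          @List.find?_cons_of_pos _ (fun q => swAt cs q.1.toList k) p t hm]
        have hk := hlt p (List.mem_cons_self ..) hm
        simp [List.mem_filter, hm, hk]
      · rw [ih _ htl (fun q hq hs => hlt q (List.mem_cons_of_mem _ hq) hs),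
          @List.find?_cons_of_neg _ (fun q => swAt cs q.1.toList k) p t hm]
        have hstep : (((List.range cs.length).filter (fun i => swAt cs p.1.toList i)).foldl
            (fun d index => d.insert index p.2) d).get? k = d.get? k := by
          rw [get?_foldl_insert_const]
          simp [List.mem_filter, hm]
        rw [hstep]

-- the digit loop at position k
lemma phase2_get? (cs : List Char) (l : List Nat) (d : PySem.Dict Nat String) (k : Nat) :
    ((l.foldl
        (fun d i =>
          if PySem.Chars.isdigit (chAt cs i) then d.insert i (String.mk [chAt cs i]) else d)
        d).get? k)
      = if k ∈ l ∧ PySem.Chars.isdigit (chAt cs k) = true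
        then some (String.mk [chAt cs k]) else d.get? k := by
  induction l generalizing d with
  | nil => simp
  | cons i t ih =>
      simp only [List.foldl_cons, ih, List.mem_cons]
      by_cases hik : k = i
      · subst hik
        by_cases hd : PySem.Chars.isdigit (chAt cs k) = true
        · by_cases hkt : k ∈ t <;>
            simp [hd, hkt, PySem.Dict.get?_insert_self]
        · simp [hd]
      · by_cases hd : PySem.Chars.isdigit (chAt cs i) = true
        · rw [if_pos hd, PySem.Dict.get?_insert_of_ne _ _ hik]
          by_cases hkt : k ∈ t <;> simp [hkt, hik]
        · rw [if_neg hd]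
          by_cases hkt : k ∈ t <;> simp [hkt, hik]

lemma words_nonempty : ∀ p ∈ textToNumber, p.1.toList ≠ [] := by decide

-- A's final dict holds exactly tokAt at every key
lemma dict_get? (cs : List Char) (k : Nat) :
    (digitPass cs (wordPass cs)).get? k = tokAt cs k := by
  unfold digitPass wordPass
  rw [phase2_get?,
    phase1_get? cs k textToNumber _ (words_excl cs k)
      (fun p hp hs => swAt_lt (words_nonempty p hp) hs)]
  by_cases hk : k < cs.length
  · simp only [List.mem_range, hk, true_and, tokAt]
    cases hf : textToNumber.find? (fun p => swAt cs p.1.toList k) <;>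
      simp [PySem.Dict.get?_empty]
  · have h1 : cs.length ≤ k := Nat.le_of_not_lt hk
    rw [tokAt_none_of_ge h1, find?_none_of_ge h1]
    simp [List.mem_range, hk, PySem.Dict.get?_empty]

lemma wordPass_nodup (cs : List Char) (ws : List (String × String))
    (d : PySem.Dict Nat String) (h : d.keys.Nodup) :
    ((ws.foldl
        (fun d p =>
          ((List.range cs.length).filter (fun i => swAt cs p.1.toList i)).foldl
            (fun d index => d.insert index p.2) d)
        d).keys.Nodup) := by
  induction ws generalizing d with
  | nil => exact h
  | cons p t ih =>
      simp only [List.foldl_cons]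
      exact ih _ (PySem.Dict.nodup_keys_foldl_insert _ (fun _ _ => p.2) _ h)

-- A's final dict has distinct keys
lemma dict_nodup (cs : List Char) : (digitPass cs (wordPass cs)).keys.Nodup := by
  have h1 : (wordPass cs).keys.Nodup :=
    wordPass_nodup cs textToNumber PySem.Dict.empty (by simp [PySem.Dict.keys_empty])
  unfold digitPass
  generalize wordPass cs = d at h1 ⊢
  induction (List.range cs.length) generalizing d with
  | nil => exact h1
  | cons i t ih =>
      simp only [List.foldl_cons]
      apply ih
      split
      · exact PySem.Dict.nodup_keys_insert _ _ _ h1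
      · exact h1

-- the sorted items of A's dict are the position-ordered (position, token) pairs
lemma sorted_items_eq (cs : List Char) :
    PySem.List.sorted (digitPass cs (wordPass cs)).items (fun p => p.1)
      = (List.range cs.length).filterMap (fun i => (tokAt cs i).map (fun v => (i, v))) := by
  set L := (List.range cs.length).filterMap (fun i => (tokAt cs i).map (fun v => (i, v))) with hL
  have hnd := dict_nodup cs
  have hmem : ∀ p : Nat × String,
      p ∈ (digitPass cs (wordPass cs)).items ↔ p ∈ L := by
    rintro ⟨k, v⟩
    rw [← PySem.Dict.get?_eq_some_iff_mem_items _ _ _ hnd, dict_get?]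
    simp only [hL, List.mem_filterMap, List.mem_range, Option.map_eq_some_iff]
    constructor
    · intro h
      refine ⟨k, ?_, v, h, rfl⟩
      by_contra hk
      rw [tokAt_none_of_ge (Nat.le_of_not_lt hk)] at h
      simp at h
    · rintro ⟨i, _, w, hw, heq⟩
      cases heq
      exact hw
  have hLpair : L.Pairwise (fun a b : Nat × String => a.1 < b.1) := by
    refine List.Pairwise.filterMap _ ?_ List.pairwise_lt_range
    rintro i j hij ⟨a, x⟩ ha ⟨b, y⟩ hb
    simp only [Option.map_eq_some_iff] at ha hb
    obtain ⟨_, _, h1⟩ := ha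
    obtain ⟨_, _, h2⟩ := hb
    cases h1; cases h2
    exact hij
  have hLnodup : L.Nodup := hLpair.imp (fun h => by
    intro he; rw [he] at h; exact lt_irrefl _ h)
  have hitems_nodup : (digitPass cs (wordPass cs)).items.Nodup := by
    have hm : ((digitPass cs (wordPass cs)).items.map Prod.fst).Nodup := hnd
    exact hm.of_map _
  have hperm : L.Perm (digitPass cs (wordPass cs)).items :=
    (List.perm_ext_iff_of_nodup hLnodup hitems_nodup).mpr (fun p => (hmem p).symm)
  exact PySem.List.sorted_eq_of_perm_of_pairwise_lt _ _ _ hperm hLpair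

-- ===== VERDICT (by name: the statement is the Claim_ definition above) =====
theorem getDigitList_spec : Claim_equal_getDigitList := by
  intro text _
  unfold Spec_getDigitList getDigitList
  rw [alt_eq, sorted_items_eq]
  generalize List.range text.toList.length = l
  induction l with
  | nil => rfl
  | cons i t ih =>
      simp only [List.filterMap_cons]
      cases h : tokAt text.toList i <;> simp [h, ih]
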